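-- pv_equiv track=rewrite | github.com/amartyatatspandey/GaffersGuide-to-a-good-game | _archive/v1_legacy/backend_v1/app/utils/smoothing.py | _player_ids_from_records
-- ===== SOURCE A (Python) =====
-- from typing import Any, Literal
--
-- def _player_ids_from_records(record: dict[str, Any], x_suffix: str = "_x", y_suffix: str = "_y") -> list[str]:
--     """Infer player ids from first record: keys ending with x_suffix with matching y_suffix."""
--     ids = []
--     for k in record:
--         if k.endswith(x_suffix):
--             stem = k[: -len(x_suffix)]
--             if (stem + y_suffix) in record:
--                 ids.append(stem)
--     return sorted(set(ids))
-- ===== SOURCE B (Python) =====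
-- def _player_ids_from_records(record, x_suffix="_x", y_suffix="_y"):
--     """Sorted-merge join: sort the x-stems and the y-stems, then walk the two sorted
--     lists with two pointers, emitting each stem present in both."""
--     xs = sorted({k.removesuffix(x_suffix) for k in record if k.endswith(x_suffix)})
--     ys = sorted({k.removesuffix(y_suffix) for k in record if k.endswith(y_suffix)})
--     out = []
--     i = j = 0
--     while i < len(xs) and j < len(ys):
--         if xs[i] < ys[j]:
--             i += 1
--         elif ys[j] < xs[i]:
--             j += 1
--         else:
--             out.append(xs[i])
--             i += 1
--             j += 1
--     return out
-- ===== Notes on version B (the rewrite author's own statement) =====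
-- stated objective: alternative
-- what changed: A's single loop that probes the dict for stem+y_suffix at every x-key is replaced by a sorted-merge join: build the x-stem and y-stem sets with str.removesuffix, sort each, and walk the two sorted lists with two pointers emitting the common stems.
-- intended difference: On inputs with an empty x_suffix whose id set actually changes, A's slice k[:-0] collapses every stem to the empty string so the only id A can report is the empty string; B strips the empty suffix as a no-op and returns the real keys that have a matching y-key, the intended stems. — e.g. on _player_ids_from_records([("a", "1"), ("a_y", "2")], "", "_y"): A returns [], B returns ["a"]
import Mathlib
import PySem

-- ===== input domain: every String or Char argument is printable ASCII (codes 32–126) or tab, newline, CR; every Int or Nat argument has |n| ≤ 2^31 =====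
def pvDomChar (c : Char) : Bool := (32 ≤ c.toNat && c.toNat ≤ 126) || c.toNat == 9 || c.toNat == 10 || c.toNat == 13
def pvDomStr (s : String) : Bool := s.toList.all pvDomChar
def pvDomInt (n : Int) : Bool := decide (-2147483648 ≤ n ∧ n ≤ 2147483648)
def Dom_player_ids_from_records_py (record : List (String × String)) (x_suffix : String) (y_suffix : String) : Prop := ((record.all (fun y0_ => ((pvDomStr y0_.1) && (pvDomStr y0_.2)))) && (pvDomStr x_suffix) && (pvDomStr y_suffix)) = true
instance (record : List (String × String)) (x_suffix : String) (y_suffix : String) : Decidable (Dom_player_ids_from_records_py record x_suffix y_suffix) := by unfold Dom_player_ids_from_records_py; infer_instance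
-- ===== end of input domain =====

-- B re-implements the task as a sorted-merge join (sort x-stems and y-stems, walk both
-- with two pointers) instead of A's per-key membership probe; same asymptotic cost
-- (objective: alternative). Intended difference on empty x_suffix is stated in D_ below.

-- ===== PORT A =====
-- A: loop over the keys; for each key ending in x_suffix take stem = k[:-len(x_suffix)]
-- and append it if stem + y_suffix is a key; return sorted(set(ids)).
def player_ids_from_records_py (record : List (String × String)) (x_suffix : String) (y_suffix : String) : List String :=
  let keys := record.map Prod.fst
  let ids := keys.foldl (fun ids k =>
    if PySem.Str.endswith k x_suffix then
      let stem := PySem.Str.slice k none (some (-(PySem.Str.len x_suffix)))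
      if keys.contains (stem ++ y_suffix) then ids ++ [stem] else ids
    else ids) []
  PySem.List.sorted (PySem.Set.ofList ids) (fun x => x) false

-- ===== PORT B =====
-- hand port of str.removesuffix (not in PySem): Python returns s[:-len(suffix)] when the
-- suffix is nonempty and matches, else s unchanged; k[:len(k)-len(sfx)] equals that in
-- both cases (for sfx = "" it is k[:len(k)] = k), so this is exact.
def pvRemovesuffix (k sfx : String) : String :=
  if PySem.Str.endswith k sfx then
    PySem.Str.slice k none (some (PySem.Str.len k - PySem.Str.len sfx))
  else k

-- Source B's while loop over indices i, j: ported as recursion consuming the heads of the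
-- two sorted lists (advancing a pointer = dropping a head); Python's str '<' is String '<'.
def pvMergeCommon : List String → List String → List String
  | [], _ => []
  | _ :: _, [] => []
  | a :: as, b :: bs =>
      if a < b then pvMergeCommon as (b :: bs)
      else if b < a then pvMergeCommon (a :: as) bs
      else a :: pvMergeCommon as bs
termination_by xs ys => xs.length + ys.length

def player_ids_from_records_py_alt (record : List (String × String)) (x_suffix : String) (y_suffix : String) : List String :=
  let keys := record.map Prod.fst
  let xs := PySem.List.sorted (PySem.Set.ofList
    ((keys.filter (fun k => PySem.Str.endswith k x_suffix)).map (fun k => pvRemovesuffix k x_suffix)))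
    (fun s => s) false
  let ys := PySem.List.sorted (PySem.Set.ofList
    ((keys.filter (fun k => PySem.Str.endswith k y_suffix)).map (fun k => pvRemovesuffix k y_suffix)))
    (fun s => s) false
  pvMergeCommon xs ys

-- ===== PRECONDITION & SPEC =====
-- On inputs with an empty x_suffix whose id set actually changes, A's slice k[:-0]
-- collapses every stem to the empty string (so that is the only id A can report), while
-- B strips the empty suffix as a no-op and returns the real stems (the keys with a
-- matching y-key) — the intended reading of the function's docstring.
def D_player_ids_from_records_py (record : List (String × String)) (x_suffix : String) (y_suffix : String) : Prop :=
  x_suffix = "" ∧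
    ¬ ((y_suffix ∈ record.map Prod.fst →
          ("" ∈ record.map Prod.fst ∧
            ∀ k ∈ record.map Prod.fst, (k ++ y_suffix) ∈ record.map Prod.fst → k = "")) ∧
       (y_suffix ∉ record.map Prod.fst →
          ∀ k ∈ record.map Prod.fst, (k ++ y_suffix) ∉ record.map Prod.fst))
instance (record : List (String × String)) (x_suffix : String) (y_suffix : String) : Decidable (D_player_ids_from_records_py record x_suffix y_suffix) := by unfold D_player_ids_from_records_py; infer_instance

def Spec_player_ids_from_records_py (record : List (String × String)) (x_suffix : String) (y_suffix : String) (out : List String) : Prop := ¬ D_player_ids_from_records_py record x_suffix y_suffix → out = player_ids_from_records_py_alt record x_suffix y_suffix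
instance (record : List (String × String)) (x_suffix : String) (y_suffix : String) (out : List String) : Decidable (Spec_player_ids_from_records_py record x_suffix y_suffix out) := by unfold Spec_player_ids_from_records_py; infer_instance

def pvDiffWitness_player_ids_from_records_py : (List (String × String)) × String × String :=
  ([("a", "1"), ("a_y", "2")], "", "_y")
def pvDiffWitnessOut_player_ids_from_records_py : (List String) × (List String) := ([], ["a"])

-- ===== CLAIM (what is proved, stated in full; the proofs are below) =====
def Claim_unchanged_player_ids_from_records_py : Prop := ∀ (record : List (String × String)) (x_suffix : String) (y_suffix : String), Dom_player_ids_from_records_py record x_suffix y_suffix → Spec_player_ids_from_records_py record x_suffix y_suffix (player_ids_from_records_py record x_suffix y_suffix)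
def Claim_changed_player_ids_from_records_py : Prop := Dom_player_ids_from_records_py (pvDiffWitness_player_ids_from_records_py.1) (pvDiffWitness_player_ids_from_records_py.2.1) (pvDiffWitness_player_ids_from_records_py.2.2) ∧ D_player_ids_from_records_py (pvDiffWitness_player_ids_from_records_py.1) (pvDiffWitness_player_ids_from_records_py.2.1) (pvDiffWitness_player_ids_from_records_py.2.2) ∧ player_ids_from_records_py (pvDiffWitness_player_ids_from_records_py.1) (pvDiffWitness_player_ids_from_records_py.2.1) (pvDiffWitness_player_ids_from_records_py.2.2) = pvDiffWitnessOut_player_ids_from_records_py.1 ∧ player_ids_from_records_py_alt (pvDiffWitness_player_ids_from_records_py.1) (pvDiffWitness_player_ids_from_records_py.2.1) (pvDiffWitness_player_ids_from_records_py.2.2) = pvDiffWitnessOut_player_ids_from_records_py.2 ∧ pvDiffWitnessOut_player_ids_from_records_py.1 ≠ pvDiffWitnessOut_player_ids_from_records_py.2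
def Claim_exact_player_ids_from_records_py : Prop := ∀ (record : List (String × String)) (x_suffix : String) (y_suffix : String), Dom_player_ids_from_records_py record x_suffix y_suffix → D_player_ids_from_records_py record x_suffix y_suffix → player_ids_from_records_py record x_suffix y_suffix ≠ player_ids_from_records_py_alt record x_suffix y_suffix

-- ===== LEMMAS AND PROOFS =====

theorem pvMergeCommon_sublist (xs ys : List String) : (pvMergeCommon xs ys).Sublist xs := by
  fun_induction pvMergeCommon xs ys with
  | case1 => exact List.nil_sublist _
  | case2 => exact List.nil_sublist _
  | case3 a as b bs h ih => exact ih.cons a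
  | case4 a as b bs h h2 ih => exact ih
  | case5 a as b bs h h2 ih => exact ih.cons₂ a

theorem mem_pvMergeCommon (xs ys : List String) :
    xs.Pairwise (· < ·) → ys.Pairwise (· < ·) →
      ∀ c, (c ∈ pvMergeCommon xs ys ↔ c ∈ xs ∧ c ∈ ys) := by
  fun_induction pvMergeCommon xs ys with
  | case1 => simp
  | case2 => simp
  | case3 a as b bs h ih =>
      intro hx hy c
      rw [ih hx.tail hy]
      constructor
      · rintro ⟨h1, h2⟩; exact ⟨List.mem_cons_of_mem _ h1, h2⟩
      · rintro ⟨h1, h2⟩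
        rcases List.mem_cons.mp h1 with rfl | h1
        · exfalso
          rcases List.mem_cons.mp h2 with rfl | h2
          · exact lt_irrefl _ h
          · exact lt_irrefl _ (h.trans (List.rel_of_pairwise_cons hy h2))
        · exact ⟨h1, h2⟩
  | case4 a as b bs h h2 ih =>
      intro hx hy c
      rw [ih hx hy.tail]
      constructor
      · rintro ⟨h1, h3⟩; exact ⟨h1, List.mem_cons_of_mem _ h3⟩
      · rintro ⟨h1, h3⟩
        rcases List.mem_cons.mp h3 with rfl | h3
        · exfalso
          rcases List.mem_cons.mp h1 with rfl | h1
          · exact lt_irrefl _ h2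
          · exact lt_irrefl _ (h2.trans (List.rel_of_pairwise_cons hx h1))
        · exact ⟨h1, h3⟩
  | case5 a as b bs h h2 ih =>
      intro hx hy c
      have hab : a = b := le_antisymm (not_lt.mp h2) (not_lt.mp h)
      subst hab
      simp only [List.mem_cons, ih hx.tail hy.tail]
      constructor
      · rintro (rfl | ⟨h1, h3⟩)
        · exact ⟨Or.inl rfl, Or.inl rfl⟩
        · exact ⟨Or.inr h1, Or.inr h3⟩
      · rintro ⟨rfl | h1, h3⟩
        · exact Or.inl rfl
        · rcases h3 with rfl | h3
          · exact absurd h1 (fun hm => lt_irrefl _ (List.rel_of_pairwise_cons hx hm))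
          · exact Or.inr ⟨h1, h3⟩

-- two strictly increasing lists with the same members are equal
theorem pvStrictSorted_eq_of_mem_iff (l₁ l₂ : List String)
    (h₁ : l₁.Pairwise (· < ·)) (h₂ : l₂.Pairwise (· < ·))
    (h : ∀ a, a ∈ l₁ ↔ a ∈ l₂) : l₁ = l₂ := by
  exact List.Perm.eq_of_pairwise (fun a b _ _ hab hba => absurd hba (lt_asymm hab)) h₁ h₂
    ((List.perm_ext_iff_of_nodup (h₁.imp ne_of_lt) (h₂.imp ne_of_lt)).mpr h)

-- A's accumulating loop is the mapped filter of the keys.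
theorem pv_foldl_two_if {α β : Type} (p q : α → Bool) (f : α → β) (l : List α) (acc : List β) :
    l.foldl (fun ids k => if p k then (if q k then ids ++ [f k] else ids) else ids) acc
      = acc ++ (l.filter (fun k => p k && q k)).map f := by
  induction l generalizing acc with
  | nil => simp
  | cons a l ih =>
      by_cases hp : p a = true <;> by_cases hq : q a = true <;>
        simp [hp, hq, ih, List.append_assoc]

-- for a key m ending with sfx, the stem slice m[:len(m)-len(sfx)] equals a iff m = a ++ sfx
theorem pv_stem_eq (m a sfx : String) (h : PySem.Str.endswith m sfx = true) :
    (PySem.Str.slice m none (some (PySem.Str.len m - PySem.Str.len sfx)) = a)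
      ↔ m = a ++ sfx := by
  rw [PySem.Str.endswith_eq, PySem.Chars.endswith_iff] at h
  obtain ⟨t, ht⟩ := h
  have hlen : m.toList.length = t.length + sfx.toList.length := by
    rw [← ht, List.length_append]
  have hslice : (PySem.Str.slice m none (some (PySem.Str.len m - PySem.Str.len sfx))).toList = t := by
    rw [PySem.Str.toList_slice, PySem.Chars.slice_eq_listSlice, PySem.Str.len_eq,
      PySem.Str.len_eq]
    rw [show ((m.toList.length : Int) - (sfx.toList.length : Int)) = ((t.length : Nat) : Int) by omega]
    rw [PySem.List.slice_to _ (by positivity)]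
    rw [← ht]
    simp
  constructor
  · intro hx
    apply String.toList_inj.mp
    rw [String.toList_append, ← ht, ← hx, hslice]
  · intro hm
    apply String.toList_inj.mp
    rw [hslice]
    have : t ++ sfx.toList = a.toList ++ sfx.toList := by
      rw [ht, hm, String.toList_append]
    exact (List.append_cancel_right this)

-- membership: (a ++ sfx) is a key  ↔  a is the stem of some key ending with sfx
theorem pv_mem_key (K : List String) (a sfx : String) :
    (a ++ sfx) ∈ K
      ↔ ∃ m ∈ K, PySem.Str.endswith m sfx = true ∧
          PySem.Str.slice m none (some (PySem.Str.len m - PySem.Str.len sfx)) = a := by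
  constructor
  · intro hmem
    have hew : PySem.Str.endswith (a ++ sfx) sfx = true := by
      rw [PySem.Str.endswith_eq, PySem.Chars.endswith_iff]
      exact ⟨a.toList, by rw [String.toList_append]⟩
    exact ⟨a ++ sfx, hmem, hew, (pv_stem_eq _ _ _ hew).mpr rfl⟩
  · rintro ⟨m, hm, hew, hsl⟩
    rw [(pv_stem_eq _ _ _ hew).mp hsl] at hm
    exact hm

-- pvRemovesuffix on a key that ends with the suffix is the stem slice
theorem pv_rs_of_endswith (m sfx : String) (h : PySem.Str.endswith m sfx = true) :
    pvRemovesuffix m sfx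
      = PySem.Str.slice m none (some (PySem.Str.len m - PySem.Str.len sfx)) := by
  simp only [pvRemovesuffix, h, if_true]

-- for a nonempty suffix, A's negative-stop slice is the stem slice
theorem pv_sliceNeg_eq (k sfx : String) (hs : sfx ≠ "") (h : PySem.Str.endswith k sfx = true) :
    PySem.Str.slice k none (some (-(PySem.Str.len sfx)))
      = PySem.Str.slice k none (some (PySem.Str.len k - PySem.Str.len sfx)) := by
  rw [PySem.Str.endswith_eq, PySem.Chars.endswith_iff] at h
  obtain ⟨t, ht⟩ := h
  have hlen : k.toList.length = t.length + sfx.toList.length := by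
    rw [← ht, List.length_append]
  have hpos : 0 < sfx.toList.length := by
    rcases hsl : sfx.toList with _ | _
    · exact absurd (String.toList_inj.mp (by simp [hsl])) hs
    · simp
  apply String.toList_inj.mp
  rw [PySem.Str.toList_slice, PySem.Str.toList_slice, PySem.Chars.slice_eq_listSlice,
    PySem.Chars.slice_eq_listSlice, PySem.Str.len_eq, PySem.Str.len_eq]
  rw [PySem.List.slice_to_neg_natCast _ _ hpos]
  rw [show ((k.toList.length : Int) - (sfx.toList.length : Int))
        = ((k.toList.length - sfx.toList.length : Nat) : Int) by omega]
  rw [PySem.List.slice_to_natCast]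

-- for the empty suffix, A's stem slice k[:-0] = k[:0] is ""
theorem pv_sliceNeg_empty (k : String) :
    PySem.Str.slice k none (some (-(PySem.Str.len ""))) = "" := by
  apply String.toList_inj.mp
  rw [PySem.Str.toList_slice, PySem.Chars.slice_eq_listSlice]
  rw [show (-(PySem.Str.len "")) = ((0 : Nat) : Int) by decide]
  rw [PySem.List.slice_to_natCast]
  simp

theorem pv_endswith_empty (k : String) : PySem.Str.endswith k "" = true := by
  rw [PySem.Str.endswith_eq, PySem.Chars.endswith_iff]
  exact ⟨k.toList, by simp [show ("" : String).toList = [] from rfl]⟩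

-- membership characterization of A's output
theorem pv_A_mem (record : List (String × String)) (x_suffix y_suffix : String) (a : String) :
    a ∈ player_ids_from_records_py record x_suffix y_suffix
      ↔ ∃ k ∈ record.map Prod.fst, PySem.Str.endswith k x_suffix = true ∧
          PySem.Str.slice k none (some (-(PySem.Str.len x_suffix))) = a ∧
          (a ++ y_suffix) ∈ record.map Prod.fst := by
  unfold player_ids_from_records_py
  set keys := record.map Prod.fst with hkeys
  simp only []
  rw [show (fun (ids : List String) (k : String) =>
        if PySem.Str.endswith k x_suffix then
          (if keys.contains ((PySem.Str.slice k none (some (-(PySem.Str.len x_suffix)))) ++ y_suffix)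
            then ids ++ [PySem.Str.slice k none (some (-(PySem.Str.len x_suffix)))] else ids)
        else ids)
      = (fun ids k =>
        if PySem.Str.endswith k x_suffix then
          (if (fun k => keys.contains ((PySem.Str.slice k none (some (-(PySem.Str.len x_suffix)))) ++ y_suffix)) k
            then ids ++ [(fun k => PySem.Str.slice k none (some (-(PySem.Str.len x_suffix)))) k] else ids)
        else ids) from rfl]
  rw [pv_foldl_two_if]
  rw [PySem.List.mem_sorted, PySem.Set.mem_ofList]
  simp only [List.nil_append, List.mem_map, List.mem_filter, Bool.and_eq_true]
  constructor
  · rintro ⟨k, ⟨hk, hew, hc⟩, hst⟩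
    rw [hst] at hc
    exact ⟨k, hk, hew, hst, List.contains_iff_mem.mp hc⟩
  · rintro ⟨k, hk, hew, hst, hy⟩
    refine ⟨k, ⟨hk, hew, ?_⟩, hst⟩
    rw [hst]
    exact List.contains_iff_mem.mpr hy

theorem pv_A_pairwise (record : List (String × String)) (x_suffix y_suffix : String) :
    (player_ids_from_records_py record x_suffix y_suffix).Pairwise (· < ·) := by
  unfold player_ids_from_records_py
  exact PySem.List.sorted_ofList_pairwise_lt _

-- membership characterization of B's output: a is an id iff both keys a++x and a++y exist
theorem pv_B_mem (record : List (String × String)) (x_suffix y_suffix : String) (a : String) :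
    a ∈ player_ids_from_records_py_alt record x_suffix y_suffix
      ↔ (a ++ x_suffix) ∈ record.map Prod.fst ∧ (a ++ y_suffix) ∈ record.map Prod.fst := by
  unfold player_ids_from_records_py_alt
  set keys := record.map Prod.fst with hkeys
  simp only []
  rw [mem_pvMergeCommon _ _ (PySem.List.sorted_ofList_pairwise_lt _)
    (PySem.List.sorted_ofList_pairwise_lt _)]
  rw [PySem.List.mem_sorted, PySem.Set.mem_ofList, PySem.List.mem_sorted, PySem.Set.mem_ofList]
  simp only [List.mem_map, List.mem_filter]
  constructor
  · rintro ⟨⟨k, ⟨hk, hewx⟩, hstx⟩, ⟨m, ⟨hm, hewy⟩, hsty⟩⟩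
    constructor
    · exact (pv_mem_key keys a x_suffix).mpr ⟨k, hk, hewx, by rw [← pv_rs_of_endswith _ _ hewx]; exact hstx⟩
    · exact (pv_mem_key keys a y_suffix).mpr ⟨m, hm, hewy, by rw [← pv_rs_of_endswith _ _ hewy]; exact hsty⟩
  · rintro ⟨hx, hy⟩
    obtain ⟨k, hk, hewx, hstx⟩ := (pv_mem_key keys a x_suffix).mp hx
    obtain ⟨m, hm, hewy, hsty⟩ := (pv_mem_key keys a y_suffix).mp hy
    exact ⟨⟨k, ⟨hk, hewx⟩, by rw [pv_rs_of_endswith _ _ hewx]; exact hstx⟩,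
           ⟨m, ⟨hm, hewy⟩, by rw [pv_rs_of_endswith _ _ hewy]; exact hsty⟩⟩

theorem pv_B_pairwise (record : List (String × String)) (x_suffix y_suffix : String) :
    (player_ids_from_records_py_alt record x_suffix y_suffix).Pairwise (· < ·) := by
  unfold player_ids_from_records_py_alt
  exact List.Pairwise.sublist (pvMergeCommon_sublist _ _) (PySem.List.sorted_ofList_pairwise_lt _)

theorem pv_append_empty (a : String) : a ++ "" = a := by
  apply String.toList_inj.mp
  rw [String.toList_append]
  simp [show ("" : String).toList = [] from rfl]

theorem pv_empty_append (a : String) : "" ++ a = a := by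
  apply String.toList_inj.mp
  rw [String.toList_append]
  simp [show ("" : String).toList = [] from rfl]

-- ===== VERDICT (by name: the statements are the Claim_ definitions above) =====
theorem player_ids_from_records_py_spec : Claim_unchanged_player_ids_from_records_py := by
  intro record x_suffix y_suffix _dom hnd
  apply pvStrictSorted_eq_of_mem_iff _ _ (pv_A_pairwise _ _ _) (pv_B_pairwise _ _ _)
  intro a
  rw [pv_A_mem, pv_B_mem]
  set K := record.map Prod.fst with hK
  by_cases hx : x_suffix = ""
  · subst hx
    have hagree := of_not_not (fun h => hnd ⟨rfl, h⟩)
    obtain ⟨hag1, hag2⟩ := hagree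
    simp only [pv_endswith_empty, pv_sliceNeg_empty, pv_append_empty, true_and]
    constructor
    · rintro ⟨k, hk, rfl, hy⟩
      rw [pv_empty_append] at hy
      exact ⟨(hag1 hy).1, by rw [pv_empty_append]; exact hy⟩
    · rintro ⟨haK, hy⟩
      by_cases hyK : y_suffix ∈ K
      · have ha : a = "" := (hag1 hyK).2 a haK hy
        subst ha
        exact ⟨"", haK, rfl, hy⟩
      · exact absurd hy (hag2 hyK a haK)
  · constructor
    · rintro ⟨k, hk, hew, hst, hy⟩
      refine ⟨?_, hy⟩
      rw [pv_sliceNeg_eq _ _ hx hew] at hst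
      exact (pv_mem_key K a x_suffix).mpr ⟨k, hk, hew, hst⟩
    · rintro ⟨hxm, hy⟩
      obtain ⟨k, hk, hew, hst⟩ := (pv_mem_key K a x_suffix).mp hxm
      exact ⟨k, hk, hew, by rw [pv_sliceNeg_eq _ _ hx hew]; exact hst, hy⟩

theorem player_ids_from_records_py_changed : Claim_changed_player_ids_from_records_py := by
  unfold Claim_changed_player_ids_from_records_py
  refine ⟨by decide, by decide, by decide, ?_, by decide⟩
  show player_ids_from_records_py_alt [("a", "1"), ("a_y", "2")] "" "_y" = ["a"]
  apply pvStrictSorted_eq_of_mem_iff _ _ (pv_B_pairwise _ _ _) (by simp)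
  intro a
  rw [pv_B_mem]
  rw [pv_append_empty]
  simp only [List.map_cons, List.map_nil, List.mem_cons]
  constructor
  · rintro ⟨rfl | rfl | h0, h2⟩
    · exact Or.inl rfl
    · rcases h2 with h | h | h
      · exact absurd h (by decide)
      · exact absurd h (by decide)
      · cases h
    · cases h0
  · rintro (rfl | h0)
    · exact ⟨Or.inl rfl, Or.inr (Or.inl (by decide))⟩
    · cases h0

theorem player_ids_from_records_py_tight : Claim_exact_player_ids_from_records_py := by
  intro record x_suffix y_suffix _dom hD heq
  obtain ⟨hx, hnag⟩ := hD
  subst hx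
  have H : ∀ a, (∃ k ∈ record.map Prod.fst, PySem.Str.endswith k "" = true ∧
      PySem.Str.slice k none (some (-(PySem.Str.len ""))) = a ∧
      (a ++ y_suffix) ∈ record.map Prod.fst)
      ↔ ((a ++ "") ∈ record.map Prod.fst ∧ (a ++ y_suffix) ∈ record.map Prod.fst) := by
    intro a
    rw [← pv_A_mem, ← pv_B_mem, heq]
  apply hnag
  constructor
  · intro hyK
    constructor
    · have := (H "").mp ⟨y_suffix, hyK, pv_endswith_empty _, pv_sliceNeg_empty _,
        by rw [pv_empty_append]; exact hyK⟩
      rw [pv_append_empty] at this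
      exact this.1
    · intro k hk hky
      obtain ⟨m, _, -, hst, -⟩ := (H k).mpr ⟨by rw [pv_append_empty]; exact hk, hky⟩
      rw [pv_sliceNeg_empty] at hst
      exact hst.symm
  · intro hynK k hk hky
    obtain ⟨m, _, -, hst, hy2⟩ := (H k).mpr ⟨by rw [pv_append_empty]; exact hk, hky⟩
    rw [pv_sliceNeg_empty] at hst
    apply hynK
    rw [← hst, pv_empty_append] at hky
    exact hky
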